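-- pv_equiv track=rewrite | github.com/dharmishshah/Web_Crawler_And_Search | src/extraCredit/QueryRelevence/src/query.py | find_if_proximity2
-- ===== SOURCE A (Python) =====
-- proximity_window = 10
--
-- def find_if_proximity2(listofpos):
--
--
--     for i in range(0, len(listofpos) - 1):
--         l1 = listofpos[i]
--         l2 = listofpos[i+1]
--         temp = checkIfProximity(l1,l2)
--         if temp[0]:
--             listofpos[i + 1] = temp[1]
--             continue
--         else:
--             return False
--
--     return True
--
-- def checkIfProximity(list1,list2):
--     listOfProximity = []
--     for elem in list1:
--         for item in list2:
--             if item - elem <=proximity_window and item - elem >= 0: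
--                 listOfProximity.append(item)
--
--
--     if len(listOfProximity) != 0:
--         return True, listOfProximity
--     else:
--         return False, []
-- ===== SOURCE B (Python) =====
-- proximity_window = 10
--
-- def find_if_proximity2(listofpos):
--     # Sort-then-merge: per pair, one monotone two-pointer sweep over the two
--     # sorted lists. Return-value equivalent to A; does NOT mutate listofpos.
--     if not listofpos:
--         return True
--     cur = sorted(listofpos[0])
--     for raw in listofpos[1:]:
--         nxt = sorted(raw)
--         survivors = []
--         j = 0
--         for item in nxt:
--             while j < len(cur) and cur[j] < item - proximity_window:
--                 j += 1
--             if j < len(cur) and cur[j] <= item: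
--                 survivors.append(item)
--         if not survivors:
--             return False
--         cur = survivors
--     return True
-- ===== Notes on version B (the rewrite author's own statement) =====
-- stated objective: faster
-- what changed: B sorts each positions list once and replaces A's nested scan per pair (which concatenates a match per (elem,item) pair, so the carried list can grow multiplicatively) with a monotone two-pointer merge sweep over the two sorted lists keeping each surviving position once.
import Mathlib
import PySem

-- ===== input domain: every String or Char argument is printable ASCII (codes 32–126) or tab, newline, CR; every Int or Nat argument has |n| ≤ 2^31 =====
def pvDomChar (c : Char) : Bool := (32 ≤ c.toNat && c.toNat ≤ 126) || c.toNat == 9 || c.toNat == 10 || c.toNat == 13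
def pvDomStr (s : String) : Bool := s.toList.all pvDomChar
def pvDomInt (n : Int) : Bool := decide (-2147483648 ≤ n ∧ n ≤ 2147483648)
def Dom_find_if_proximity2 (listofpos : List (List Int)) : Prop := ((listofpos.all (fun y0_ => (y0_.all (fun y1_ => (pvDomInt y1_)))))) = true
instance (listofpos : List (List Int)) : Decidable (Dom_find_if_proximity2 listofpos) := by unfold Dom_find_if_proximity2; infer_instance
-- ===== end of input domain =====

-- B sorts each list and uses a monotone two-pointer sweep per adjacent pair instead of A's nested
-- scan with a concatenated carried list; equivalence is about the RETURN value only (A rewrites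
-- listofpos[i+1] in place, B does not mutate its argument).

-- ===== PORT A =====
def checkIfProximity (list1 list2 : List Int) : Bool × List Int :=
  let listOfProximity :=
    list1.foldl (fun acc elem =>
      acc ++ list2.filter (fun item => decide (item - elem ≤ 10 ∧ item - elem ≥ 0))) []
  if listOfProximity.length ≠ 0 then (true, listOfProximity) else (false, [])

-- the index loop with in-place replacement of listofpos[i+1], carried as the current l1
def pvLoopA (l1 : List Int) (rest : List (List Int)) : Bool :=
  match rest with
  | [] => true
  | l2 :: rs =>
    let temp := checkIfProximity l1 l2
    if temp.1 then pvLoopA temp.2 rs else false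

def find_if_proximity2 (listofpos : List (List Int)) : Bool :=
  match listofpos with
  | [] => true
  | l1 :: rest => pvLoopA l1 rest

-- ===== PORT B =====
-- the inner `while j < len(cur) and cur[j] < item - proximity_window: j += 1`
def pvAdv (cur : List Int) (item : Int) (j : Nat) : Nat :=
  if h : j < cur.length ∧ cur.getD j 0 < item - 10 then pvAdv cur item (j + 1) else j
  termination_by cur.length - j
  decreasing_by omega

-- the `for item in nxt` loop building `survivors`, carrying the pointer j
def pvSweep (cur : List Int) (j : Nat) : List Int → List Int
  | [] => []
  | item :: rest =>
    let j' := pvAdv cur item j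
    if j' < cur.length ∧ cur.getD j' 0 ≤ item then item :: pvSweep cur j' rest
    else pvSweep cur j' rest

-- the `for raw in listofpos[1:]` loop
def pvLoopB (cur : List Int) (rest : List (List Int)) : Bool :=
  match rest with
  | [] => true
  | raw :: rs =>
    let nxt := PySem.List.sorted raw (fun x => x) false
    let survivors := pvSweep cur 0 nxt
    if survivors = [] then false else pvLoopB survivors rs

def find_if_proximity2_alt (listofpos : List (List Int)) : Bool :=
  match listofpos with
  | [] => true
  | first :: rest => pvLoopB (PySem.List.sorted first (fun x => x) false) rest

-- ===== PRECONDITION & SPEC =====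
def Spec_find_if_proximity2 (listofpos : List (List Int)) (out : Bool) : Prop := out = find_if_proximity2_alt listofpos
instance (listofpos : List (List Int)) (out : Bool) : Decidable (Spec_find_if_proximity2 listofpos out) := by unfold Spec_find_if_proximity2; infer_instance

-- ===== CLAIM (what is proved, stated in full; the proofs are below) =====
def Claim_equal_find_if_proximity2 : Prop := ∀ (listofpos : List (List Int)), Dom_find_if_proximity2 listofpos → Spec_find_if_proximity2 listofpos (find_if_proximity2 listofpos)

-- ===== LEMMAS AND PROOFS =====

-- the while-loop keeps skipping elements < item - 10 and stops at the first one that is not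
theorem pvAdv_spec (cur : List Int) (item : Int) : ∀ (j : Nat),
    (∀ k, k < j → k < cur.length → cur.getD k 0 < item - 10) →
    (∀ k, k < pvAdv cur item j → k < cur.length → cur.getD k 0 < item - 10) ∧
    ¬ (pvAdv cur item j < cur.length ∧ cur.getD (pvAdv cur item j) 0 < item - 10) := by
  intro j
  induction j using pvAdv.induct cur item with
  | case1 j h ih =>
    intro hj
    rw [pvAdv, dif_pos h]
    apply ih
    intro k hk hk'
    rcases Nat.lt_or_ge k j with hlt | hge
    · exact hj k hlt hk'
    · have : k = j := by omega
      subst this; exact h.2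
  | case2 j h =>
    intro hj
    rw [pvAdv, dif_neg h]
    exact ⟨hj, h⟩

-- after the skip, the guarded test at the pointer decides 'some element of cur lies in [item-10, item]'
theorem pvHit_iff (cur : List Int) (hc : cur.Pairwise (· ≤ ·)) (item : Int) (j' : Nat)
    (hinv : ∀ k, k < j' → k < cur.length → cur.getD k 0 < item - 10)
    (hstop : ¬ (j' < cur.length ∧ cur.getD j' 0 < item - 10)) :
    (j' < cur.length ∧ cur.getD j' 0 ≤ item) ↔
      cur.any (fun e => decide (item - 10 ≤ e ∧ e ≤ item)) = true := by
  constructor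
  · rintro ⟨hlen, hle⟩
    have hgd : cur.getD j' 0 = cur[j'] := List.getD_eq_getElem cur 0 hlen
    have hge : item - 10 ≤ cur[j'] := by
      by_contra hcon
      exact hstop ⟨hlen, by rw [hgd]; omega⟩
    simp only [List.any_eq_true, decide_eq_true_eq]
    exact ⟨cur[j'], List.getElem_mem hlen, hge, by rw [hgd] at hle; exact hle⟩
  · intro hany
    simp only [List.any_eq_true, decide_eq_true_eq] at hany
    obtain ⟨e, he, h1, h2⟩ := hany
    obtain ⟨k, hk, hke⟩ := List.mem_iff_getElem.mp he
    have hkge : j' ≤ k := by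
      by_contra hcon
      have := hinv k (by omega) hk
      rw [List.getD_eq_getElem cur 0 hk, hke] at this
      omega
    have hlen : j' < cur.length := lt_of_le_of_lt hkge hk
    refine ⟨hlen, ?_⟩
    rw [List.getD_eq_getElem cur 0 hlen]
    rcases Nat.lt_or_ge j' k with hlt | hge
    · have := List.pairwise_iff_getElem.mp hc j' k hlen hk hlt
      omega
    · have : j' = k := by omega
      subst this; rw [hke]; omega

-- with both lists sorted, the single sweep computes exactly the proximity filter
theorem pvSweep_eq_filter (cur : List Int) (hc : cur.Pairwise (· ≤ ·)) :
    ∀ (nxt : List Int) (j : Nat), nxt.Pairwise (· ≤ ·) →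
    (∀ k, k < j → k < cur.length → ∀ item ∈ nxt, cur.getD k 0 < item - 10) →
    pvSweep cur j nxt = nxt.filter (fun item => cur.any (fun e => decide (item - 10 ≤ e ∧ e ≤ item))) := by
  intro nxt
  induction nxt with
  | nil => intro j _ _; rfl
  | cons item rest ih =>
    intro j hp hinv
    have hinvi : ∀ k, k < j → k < cur.length → cur.getD k 0 < item - 10 :=
      fun k hk hk' => hinv k hk hk' item (List.mem_cons_self ..)
    obtain ⟨hinv', hstop⟩ := pvAdv_spec cur item j hinvi
    have hiff := pvHit_iff cur hc item (pvAdv cur item j) hinv' hstop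
    have hrest : pvSweep cur (pvAdv cur item j) rest =
        rest.filter (fun it => cur.any (fun e => decide (it - 10 ≤ e ∧ e ≤ it))) := by
      apply ih (pvAdv cur item j) (List.Pairwise.of_cons hp)
      intro k hk hk' it hit
      have h1 := hinv' k hk hk'
      have h2 : item ≤ it := (List.pairwise_cons.mp hp).1 it hit
      omega
    simp only [pvSweep, List.filter_cons]
    by_cases hcond : pvAdv cur item j < cur.length ∧ cur.getD (pvAdv cur item j) 0 ≤ item
    · rw [if_pos hcond, hiff.mp hcond, if_pos rfl, hrest]
    · have hfalse : cur.any (fun e => decide (item - 10 ≤ e ∧ e ≤ item)) = false := by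
        rcases Bool.eq_false_or_eq_true (cur.any (fun e => decide (item - 10 ≤ e ∧ e ≤ item))) with h | h
        · exact absurd (hiff.mpr h) hcond
        · exact h
      rw [if_neg hcond, hfalse, hrest]
      simp

-- membership in A's concatenated per-pair list, against a same-membership carried list
theorem pv_mem_step (c c' l2 : List Int) (h : ∀ x : Int, x ∈ c ↔ x ∈ c') (x : Int) :
    (x ∈ c.foldl (fun acc elem =>
        acc ++ l2.filter (fun item => decide (item - elem ≤ 10 ∧ item - elem ≥ 0))) []) ↔
    x ∈ l2.filter (fun item => c'.any (fun elem => decide (item - 10 ≤ elem ∧ elem ≤ item))) := by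
  rw [PySem.List.foldl_append_eq_flatMap]
  simp only [List.nil_append, List.mem_flatMap, List.mem_filter, decide_eq_true_eq,
    List.any_eq_true]
  constructor
  · rintro ⟨e, he, hx, h1, h2⟩
    exact ⟨hx, e, (h e).mp he, by omega, by omega⟩
  · rintro ⟨hx, e, he, h1, h2⟩
    exact ⟨e, (h e).mpr he, hx, by omega, by omega⟩

-- the two chained loops agree whenever the carried lists have the same members and B's is sorted
theorem pv_loop_eq (rest : List (List Int)) : ∀ (cA cB : List Int),
    cB.Pairwise (· ≤ ·) → (∀ x : Int, x ∈ cA ↔ x ∈ cB) →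
    pvLoopA cA rest = pvLoopB cB rest := by
  induction rest with
  | nil => intro cA cB _ _; rfl
  | cons raw rs ih =>
    intro cA cB hs h
    simp only [pvLoopA, pvLoopB, checkIfProximity]
    set lopA := cA.foldl (fun acc elem =>
      acc ++ raw.filter (fun item => decide (item - elem ≤ 10 ∧ item - elem ≥ 0))) [] with hA
    set nxt := PySem.List.sorted raw (fun x => x) false with hnxt
    have hnp : nxt.Pairwise (· ≤ ·) := PySem.List.sorted_pairwise raw (fun x => x)
    have hsw : pvSweep cB 0 nxt =
        nxt.filter (fun item => cB.any (fun e => decide (item - 10 ≤ e ∧ e ≤ item))) :=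
      pvSweep_eq_filter cB hs nxt 0 hnp (fun k hk => by omega)
    have hmem : ∀ x : Int, x ∈ lopA ↔ x ∈ pvSweep cB 0 nxt := by
      intro x
      rw [hA, hsw]
      rw [pv_mem_step cA cB raw h x]
      simp only [List.mem_filter, hnxt, PySem.List.mem_sorted]
    have hsurv_sorted : (pvSweep cB 0 nxt).Pairwise (· ≤ ·) := by
      rw [hsw]; exact List.Pairwise.filter _ hnp
    by_cases hne : lopA.length ≠ 0
    · have hBne : ¬ pvSweep cB 0 nxt = [] := by
        intro hnil
        rcases List.exists_mem_of_length_pos (Nat.pos_of_ne_zero hne) with ⟨x, hx⟩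
        exact absurd ((hmem x).mp hx) (by simp [hnil])
      simp only [if_pos hne, if_neg hBne]
      exact ih lopA (pvSweep cB 0 nxt) hsurv_sorted hmem
    · have hAnil : lopA = [] := List.eq_nil_of_length_eq_zero (by omega)
      have hBnil : pvSweep cB 0 nxt = [] := by
        rcases hd : pvSweep cB 0 nxt with _ | ⟨x, xs⟩
        · rfl
        · exact absurd ((hmem x).mpr (by simp [hd])) (by simp [hAnil])
      simp [hAnil, hBnil]

-- ===== VERDICT (by name: the statement is the Claim_ definition above) =====
theorem find_if_proximity2_spec : Claim_equal_find_if_proximity2 := by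
  intro listofpos _
  unfold Spec_find_if_proximity2 find_if_proximity2 find_if_proximity2_alt
  cases listofpos with
  | nil => rfl
  | cons first rest =>
    exact pv_loop_eq rest first (PySem.List.sorted first (fun x => x) false)
      (PySem.List.sorted_pairwise first (fun x => x))
      (fun x => (PySem.List.mem_sorted ..).symm)
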